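-- pv_equiv track=rewrite | github.com/eiler2005/clawden-ai | artifacts/wiki-import/importer.py | _body_to_sections
-- ===== SOURCE A (Python) =====
-- def _body_to_sections(body: str) -> list[tuple[str, str]]:
--     if not body.strip():
--         return []
--     lines = body.splitlines()
--     sections: list[tuple[str, str]] = []
--     current_heading: str | None = None
--     current_lines: list[str] = []
--     for line in lines:
--         if line.startswith("## "):
--             if current_heading is not None:
--                 sections.append((current_heading, "\n".join(current_lines).strip()))
--             current_heading = line[3:].strip()
--             current_lines = []
--             continue
--         if current_heading is not None:
--             current_lines.append(line)
--     if current_heading is not None: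
--         sections.append((current_heading, "\n".join(current_lines).strip()))
--     return sections
-- ===== SOURCE B (Python) =====
-- def _body_to_sections(body: str) -> list[tuple[str, str]]:
--     if not body.strip():
--         return []
--
--     def not_heading(line: str) -> bool:
--         return not line.startswith("## ")
--
--     lines = body.splitlines()
--     # drop everything before the first heading
--     i = 0
--     while i < len(lines) and not_heading(lines[i]):
--         i += 1
--     rest = lines[i:]
--     # rest is empty or starts with a heading; emit one block per heading
--     sections: list[tuple[str, str]] = []
--     while rest:
--         k = 1
--         while k < len(rest) and not_heading(rest[k]):
--             k += 1
--         sections.append((rest[0][3:].strip(), "\n".join(rest[1:k]).strip()))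
--         rest = rest[k:]
--     return sections
-- ===== Notes on version B (the rewrite author's own statement) =====
-- stated objective: alternative
-- what changed: Replaces A's single fold carrying (sections, current_heading, current_lines) accumulator state with a two-phase block parse: first drop all lines before the first heading line, then repeatedly take one heading plus its span of following non-heading lines as one section.
import Mathlib
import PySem

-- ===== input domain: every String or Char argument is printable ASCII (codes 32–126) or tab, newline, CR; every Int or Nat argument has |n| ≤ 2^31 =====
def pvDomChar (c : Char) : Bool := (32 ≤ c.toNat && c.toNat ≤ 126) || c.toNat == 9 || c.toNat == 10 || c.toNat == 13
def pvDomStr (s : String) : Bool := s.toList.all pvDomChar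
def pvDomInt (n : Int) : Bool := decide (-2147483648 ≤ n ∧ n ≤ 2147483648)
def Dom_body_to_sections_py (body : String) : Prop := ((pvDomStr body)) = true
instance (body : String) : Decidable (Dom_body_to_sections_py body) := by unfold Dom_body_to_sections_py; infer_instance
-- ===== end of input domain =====

-- B parses the line list by recursive descent on heading-delimited blocks (dropWhile/takeWhile spans)
-- instead of A's single fold with Option-heading accumulator state; objective: alternative decomposition.


-- ===== PORT A =====
-- fold state: (sections, current_heading, current_lines)
def pvStepA (st : List (String × String) × Option String × List String) (line : String) :
    List (String × String) × Option String × List String :=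
  if PySem.Str.startswith line "## " then
    match st.2.1 with
    | some h =>
        (st.1 ++ [(h, PySem.Str.strip (PySem.Str.join "\n" st.2.2))],
         some (PySem.Str.strip (PySem.Str.slice line (some 3) none)), [])
    | none => (st.1, some (PySem.Str.strip (PySem.Str.slice line (some 3) none)), [])
  else
    match st.2.1 with
    | some h => (st.1, some h, st.2.2 ++ [line])
    | none => st

def pvFinishA (st : List (String × String) × Option String × List String) :
    List (String × String) :=
  match st.2.1 with
  | some h => st.1 ++ [(h, PySem.Str.strip (PySem.Str.join "\n" st.2.2))]
  | none => st.1

def body_to_sections_py (body : String) : List (String × String) :=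
  if PySem.Str.strip body = "" then []
  else pvFinishA ((PySem.Str.splitlines body).foldl pvStepA ([], none, []))

-- ===== PORT B =====
def pvNotHeading (line : String) : Bool := !(PySem.Str.startswith line "## ")

-- rest is empty or starts with a heading line; content = span of non-heading lines after it
def pvParse : List String → List (String × String)
  | [] => []
  | h :: rest =>
      (PySem.Str.strip (PySem.Str.slice h (some 3) none),
       PySem.Str.strip (PySem.Str.join "\n" (rest.takeWhile pvNotHeading)))
      :: pvParse (rest.dropWhile pvNotHeading)
termination_by l => l.length
decreasing_by
  exact Nat.lt_succ_of_le (List.length_dropWhile_le _ _)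

def body_to_sections_py_alt (body : String) : List (String × String) :=
  if PySem.Str.strip body = "" then []
  else pvParse ((PySem.Str.splitlines body).dropWhile pvNotHeading)

-- ===== PRECONDITION & SPEC =====
def Spec_body_to_sections_py (body : String) (out : List (String × String)) : Prop := out = body_to_sections_py_alt body
instance (body : String) (out : List (String × String)) : Decidable (Spec_body_to_sections_py body out) := by unfold Spec_body_to_sections_py; infer_instance

-- ===== CLAIM (what is proved, stated in full; the proofs are below) =====
def Claim_equal_body_to_sections_py : Prop := ∀ (body : String), Dom_body_to_sections_py body → Spec_body_to_sections_py body (body_to_sections_py body)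

-- ===== LEMMAS AND PROOFS =====

-- While a heading is open, A's fold produces that section (with pending lines ++ the coming span)
-- and then parses the remainder exactly as pvParse does.
theorem pv_fold_some (lines : List String) :
    ∀ (secs : List (String × String)) (h : String) (cls : List String),
      pvFinishA (lines.foldl pvStepA (secs, some h, cls)) =
        secs ++ (h, PySem.Str.strip (PySem.Str.join "\n" (cls ++ lines.takeWhile pvNotHeading)))
          :: pvParse (lines.dropWhile pvNotHeading) := by
  induction lines with
  | nil => intro secs h cls; simp [pvFinishA, pvParse]
  | cons l ls ih =>
    intro secs h cls
    by_cases hl : PySem.Str.startswith l "## "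
    all_goals simp only [PySem.Str.startswith_eq, show ("## ".toList) = ['#', '#', ' '] from rfl] at hl
    · have e1 : pvStepA (secs, some h, cls) l =
          (secs ++ [(h, PySem.Str.strip (PySem.Str.join "\n" cls))],
           some (PySem.Str.strip (PySem.Str.slice l (some 3) none)), []) := by
        simp [pvStepA, hl]
      have e2 : (l :: ls).takeWhile pvNotHeading = [] := by
        simp [List.takeWhile_cons, pvNotHeading, hl]
      have e3 : (l :: ls).dropWhile pvNotHeading = l :: ls := by
        simp [List.dropWhile_cons, pvNotHeading, hl]
      rw [List.foldl_cons, e1, ih, e2, e3]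
      simp [pvParse]
    · have e1 : pvStepA (secs, some h, cls) l = (secs, some h, cls ++ [l]) := by
        simp [pvStepA, hl]
      have e2 : (l :: ls).takeWhile pvNotHeading = l :: ls.takeWhile pvNotHeading := by
        simp [List.takeWhile_cons, pvNotHeading, hl]
      have e3 : (l :: ls).dropWhile pvNotHeading = ls.dropWhile pvNotHeading := by
        simp [List.dropWhile_cons, pvNotHeading, hl]
      rw [List.foldl_cons, e1, ih, e2, e3]
      simp

-- Before the first heading A drops lines; from the first heading on, it is pvParse.
theorem pv_fold_none (lines : List String) :
    pvFinishA (lines.foldl pvStepA ([], none, [])) =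
      pvParse (lines.dropWhile pvNotHeading) := by
  induction lines with
  | nil => simp [pvFinishA, pvParse]
  | cons l ls ih =>
    by_cases hl : PySem.Str.startswith l "## "
    all_goals simp only [PySem.Str.startswith_eq, show ("## ".toList) = ['#', '#', ' '] from rfl] at hl
    · have e1 : pvStepA ([], none, []) l =
          ([], some (PySem.Str.strip (PySem.Str.slice l (some 3) none)), []) := by
        simp [pvStepA, hl]
      have e3 : (l :: ls).dropWhile pvNotHeading = l :: ls := by
        simp [List.dropWhile_cons, pvNotHeading, hl]
      rw [List.foldl_cons, e1, pv_fold_some, e3]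
      simp [pvParse]
    · have e1 : pvStepA ([], none, []) l = ([], none, []) := by
        simp [pvStepA, hl]
      have e3 : (l :: ls).dropWhile pvNotHeading = ls.dropWhile pvNotHeading := by
        simp [List.dropWhile_cons, pvNotHeading, hl]
      rw [List.foldl_cons, e1, e3]
      exact ih

-- ===== VERDICT (by name: the statement is the Claim_ definition above) =====
theorem body_to_sections_py_spec : Claim_equal_body_to_sections_py := by
  intro body _
  unfold Spec_body_to_sections_py body_to_sections_py body_to_sections_py_alt
  by_cases hb : PySem.Str.strip body = ""
  · simp [hb]
  · rw [if_neg hb, if_neg hb]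
    exact pv_fold_none _
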